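-- pv_equiv track=rewrite | github.com/sirblob123/Ross2026 | RossQ1-2026.py | find_unique_tsuro_cards
-- ===== SOURCE A (Python) =====
-- def circle_distance(i, j, total):
--     # Finds the shortest path around the circle between two dots
--     diff = abs(i - j) % total
--     return min(diff, total - diff)
--
-- def normalize_matching(pairs, total):
--     # Creates one standard version of a pattern so the same arrangement is not counted twice
--     n = total // 2
--     canonical = None
--     # Try every possible turn and flip of the circle
--     for rot in range(total):
--         for reflect in [False, True]:
--             transformed = []
--             for a, b in pairs:
--                 aa = (a + rot) % total
--                 bb = (b + rot) % total
--                 if reflect: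
--                     aa = (-aa) % total
--                     bb = (-bb) % total
--                 transformed.append(tuple(sorted([aa, bb])))
--             transformed.sort()
--             transformed_tuple = tuple(transformed)
--             if canonical is None or transformed_tuple < canonical:
--                 canonical = transformed_tuple
--     return canonical
--
-- def find_all_tsuro_cards(n):
--     # Looks for every possible way to connect all dots using each length once
--     if n < 1:
--         return []
--     total = 2 * n
--     solutions = []
--     def backtrack(paired, used_weights, current_pairs, start_node):
--         # When every dot is connected, save the result
--         if len(current_pairs) == n:
--             solution = sorted(current_pairs)
--             solutions.append(solution)
--             return
--         # Find the lowest numbered dot that is still free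
--         i = -1
--         for node in range(start_node, total):
--             if not paired[node]:
--                 i = node
--                 break
--         if i == -1:
--             return
--         # Try each possible length from shortest to longest
--         for k in range(1, n + 1):
--             if k in used_weights:
--                 continue
--             # Check both directions around the circle
--             for direction in [1, -1]:
--                 j = (i + direction * k) % total
--                 if j == i or paired[j]:
--                     continue
--                 w = circle_distance(i, j, total)
--                 if w != k:
--                     continue
--                 pair = tuple(sorted([i, j]))
--                 # Connect the dots and continue
--                 paired[i] = paired[j] = True
--                 used_weights.add(k)
--                 current_pairs.append(pair)
--                 next_start = 0 if all(paired[:i+1]) else i + 1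
--                 backtrack(paired, used_weights, current_pairs, next_start)
--                 # Undo the connection and try the next option
--                 current_pairs.pop()
--                 used_weights.remove(k)
--                 paired[i] = paired[j] = False
--     paired = [False] * total
--     backtrack(paired, set(), [], 0)
--     # Remove the extra copies so each drawing appears only once
--     seen = set()
--     clean = []
--     for sol in solutions:
--         fs = frozenset(sol)
--         if fs not in seen:
--             seen.add(fs)
--             clean.append(sol)
--     return clean
--     return solutions
--
-- def find_unique_tsuro_cards(n):
--     # Takes the full list and keeps only the different patterns (same shape counts as one)
--     all_solutions = find_all_tsuro_cards(n)
--     if not all_solutions: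
--         return []
--     seen = set()
--     unique = []
--     for sol in all_solutions:
--         canon = normalize_matching(sol, 2 * n)
--         if canon not in seen:
--             seen.add(canon)
--             unique.append([list(p) for p in canon])
--     unique.sort(key=lambda x: tuple(tuple(p) for p in x))
--     return unique
-- ===== SOURCE B (Python) =====
-- def circle_distance(i, j, total):
--     # Finds the shortest path around the circle between two dots
--     diff = abs(i - j) % total
--     return min(diff, total - diff)
--
-- def normalize_matching(pairs, total):
--     # Creates one standard version of a pattern so the same arrangement is not counted twice
--     n = total // 2
--     canonical = None
--     # Try every possible turn and flip of the circle
--     for rot in range(total):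
--         for reflect in [False, True]:
--             transformed = []
--             for a, b in pairs:
--                 aa = (a + rot) % total
--                 bb = (b + rot) % total
--                 if reflect:
--                     aa = (-aa) % total
--                     bb = (-bb) % total
--                 transformed.append(tuple(sorted([aa, bb])))
--             transformed.sort()
--             transformed_tuple = tuple(transformed)
--             if canonical is None or transformed_tuple < canonical:
--                 canonical = transformed_tuple
--     return canonical
--
-- def find_unique_tsuro_cards(n):
--     # Weight-major search: place the chord of length k at level k, for k = 1..n,
--     # then keep one representative per symmetry class.
--     if n < 1:
--         return []
--     total = 2 * n
--     solutions = []
--     paired = [False] * total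
--
--     def place(k, pairs):
--         if k > n:
--             solutions.append(sorted(pairs))
--             return
--         # each unordered chord of circle-length k is {i, (i+k) % total} for exactly
--         # one i in range(limit)
--         limit = total if k < n else n
--         for i in range(limit):
--             j = (i + k) % total
--             if paired[i] or paired[j]:
--                 continue
--             paired[i] = paired[j] = True
--             place(k + 1, pairs + [(i, j) if i < j else (j, i)])
--             paired[i] = paired[j] = False
--
--     place(1, [])
--     seen = set()
--     unique = []
--     for sol in solutions:
--         canon = normalize_matching(sol, total)
--         if canon not in seen:
--             seen.add(canon)
--             unique.append([list(p) for p in canon])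
--     unique.sort(key=lambda x: tuple(tuple(p) for p in x))
--     return unique
-- ===== Notes on version B (the rewrite author's own statement) =====
-- stated objective: alternative
-- what changed: The node-major backtracking (pick lowest free node, try every unused chord length in both directions with a distance re-check, plus a frozenset dedup of duplicate discoveries) is replaced by a weight-major search that places the unique chord of circle-length k at recursion level k (k = 1..n), generating every complete matching exactly once with no used-weight set, no direction/distance checks and no post-hoc dedup; the normalize/dedup/sort tail is unchanged.
import Mathlib
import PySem

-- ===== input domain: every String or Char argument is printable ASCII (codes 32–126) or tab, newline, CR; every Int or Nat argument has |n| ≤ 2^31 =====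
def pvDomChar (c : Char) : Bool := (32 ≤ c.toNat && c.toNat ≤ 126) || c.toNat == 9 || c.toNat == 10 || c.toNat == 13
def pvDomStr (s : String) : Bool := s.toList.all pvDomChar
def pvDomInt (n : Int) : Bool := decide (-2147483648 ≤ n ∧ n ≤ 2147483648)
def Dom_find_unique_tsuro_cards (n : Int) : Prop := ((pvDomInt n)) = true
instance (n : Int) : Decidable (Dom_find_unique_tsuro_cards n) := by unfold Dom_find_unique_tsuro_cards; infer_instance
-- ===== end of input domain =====

-- B replaces A's node-major backtracking (lowest free node, every unused length, both
-- directions, frozenset dedup of duplicate discoveries) by a duplicate-free weight-major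
-- search that places the chord of circle-length k at recursion level k (alternative decomposition).

-- ===== PORT A =====

-- tuple(sorted([a, b])) for two ints
def sort2 (a b : Int) : Int × Int := if b < a then (b, a) else (a, b)

def circle_distance (i j total : Int) : Int :=
  let diff := PySem.Int.mod |i - j| total
  min diff (total - diff)

-- Python '<' on int 2-tuples (exact: lexicographic)
def pairLtb (p q : Int × Int) : Bool := decide (p.1 < q.1) || (decide (p.1 = q.1) && decide (p.2 < q.2))

-- Python '<' on tuples of int 2-tuples (exact: lexicographic, shorter tuple first on ties)
def pairsLtb : List (Int × Int) → List (Int × Int) → Bool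
  | [], [] => false
  | [], _ :: _ => true
  | _ :: _, [] => false
  | p :: ps, q :: qs => pairLtb p q || (decide (p = q) && pairsLtb ps qs)

def normalize_matching (pairs : List (Int × Int)) (total : Int) : Option (List (Int × Int)) :=
  (PySem.List.pyRange 0 total 1).foldl (fun canonical rot =>
    ([false, true] : List Bool).foldl (fun canonical reflect =>
      let transformed := pairs.map (fun p =>
        let aa := PySem.Int.mod (p.1 + rot) total
        let bb := PySem.Int.mod (p.2 + rot) total
        let aa := if reflect then PySem.Int.mod (-aa) total else aa
        let bb := if reflect then PySem.Int.mod (-bb) total else bb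
        sort2 aa bb)
      let t := PySem.List.sorted2 transformed Prod.fst Prod.snd
      match canonical with
      | none => some t
      | some c => if pairsLtb t c then some t else some c) canonical) none

-- paired[m] (m is always a nonnegative in-range index at every use site)
def pvPairedAt (paired : List Bool) (m : Int) : Bool := PySem.List.pyGetD paired m true

-- A's 'for node in range(start, total): if not paired[node]: i = node; break' (none = -1)
def pvFindFree (paired : List Bool) (start total : Int) : Option Int :=
  (PySem.List.pyRange start total 1).find? (fun node => !pvPairedAt paired node)

-- sorted(list_of_int_2-tuples)
def pvSortPairs (M : List (Int × Int)) : List (Int × Int) := PySem.List.sorted2 M Prod.fst Prod.snd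

-- A's backtrack; the mutable 'solutions' accumulator becomes the returned list (same order).
-- fuel is only a structural-termination device: each call below length n consumes one unit
-- and the initial fuel n+1 dominates the recursion depth.
def pvBacktrackA (n total : Int) (fuel : Nat) (paired : List Bool) (used : PySem.Set Int)
    (current : List (Int × Int)) (start : Int) : List (List (Int × Int)) :=
  match fuel with
  | 0 => []
  | fuel + 1 =>
    if (current.length : Int) = n then [pvSortPairs current]
    else
      match pvFindFree paired start total with
      | none => []
      | some i =>
        (PySem.List.pyRange 1 (n + 1) 1).flatMap (fun k =>
          if PySem.Set.contains used k then []
          else ([1, -1] : List Int).flatMap (fun dir =>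
            let j := PySem.Int.mod (i + dir * k) total
            if j = i || pvPairedAt paired j then []
            else if circle_distance i j total ≠ k then []
            else
              let paired' := PySem.List.pySetD (PySem.List.pySetD paired i true) j true
              let nextStart := if (PySem.List.slice paired' none (some (i + 1))).all (fun b => b) then 0 else i + 1
              pvBacktrackA n total fuel paired' (PySem.Set.add used k) (current ++ [sort2 i j]) nextStart))

def find_all_tsuro_cards (n : Int) : List (List (Int × Int)) :=
  if n < 1 then []
  else
    let total := 2 * n
    let solutions := pvBacktrackA n total (n.toNat + 1) (List.replicate total.toNat false) PySem.Set.empty [] 0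
    -- dedup by frozenset: membership in 'seen' is frozenset equality = PySem.Set.equal
    (solutions.foldl (fun (st : List (PySem.Set (Int × Int)) × List (List (Int × Int))) sol =>
      let fs := PySem.Set.ofList sol
      if st.1.any (fun s => PySem.Set.equal s fs) then st
      else (st.1 ++ [fs], st.2 ++ [sol])) ([], [])).2

-- the canonical-form dedup + final sort tail, textually identical in A and B
-- ('canon' is never none at any call site: total ≥ 2 there, so .getD [] is unreachable)
def pvPipeline (sols : List (List (Int × Int))) (total : Int) : List (List (List Int)) :=
  let st := sols.foldl (fun (st : List (Option (List (Int × Int))) × List (List (List Int))) sol =>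
    let canon := normalize_matching sol total
    if canon ∈ st.1 then st
    else (st.1 ++ [canon], st.2 ++ [(canon.getD []).map (fun p => [p.1, p.2])])) ([], [])
  PySem.List.sorted st.2 (fun x => x)

def find_unique_tsuro_cards (n : Int) : List (List (List Int)) :=
  let all := find_all_tsuro_cards n
  if all = [] then [] else pvPipeline all (2 * n)

-- ===== PORT B =====

-- B's place(k, pairs): at level k connect one still-free chord {i, (i+k) % total} of
-- circle-length k and recurse to k+1 (fuel as above; initial fuel n+1 dominates depth).
def pvPlaceB (n total : Int) (fuel : Nat) (paired : List Bool) (pairs : List (Int × Int)) (k : Int) :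
    List (List (Int × Int)) :=
  match fuel with
  | 0 => []
  | fuel + 1 =>
    if n < k then [pvSortPairs pairs]
    else
      let limit := if k < n then total else n
      (PySem.List.pyRange 0 limit 1).flatMap (fun i =>
        let j := PySem.Int.mod (i + k) total
        if pvPairedAt paired i || pvPairedAt paired j then []
        else pvPlaceB n total fuel (PySem.List.pySetD (PySem.List.pySetD paired i true) j true)
          (pairs ++ [if i < j then (i, j) else (j, i)]) (k + 1))

def find_unique_tsuro_cards_alt (n : Int) : List (List (List Int)) :=
  if n < 1 then []
  else
    let total := 2 * n
    let solutions := pvPlaceB n total (n.toNat + 1) (List.replicate total.toNat false) [] 1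
    pvPipeline solutions total

-- ===== PRECONDITION & SPEC =====
def Spec_find_unique_tsuro_cards (n : Int) (out : List (List (List Int))) : Prop := out = find_unique_tsuro_cards_alt n
instance (n : Int) (out : List (List (List Int))) : Decidable (Spec_find_unique_tsuro_cards n out) := by unfold Spec_find_unique_tsuro_cards; infer_instance

-- ===== CLAIM (what is proved, stated in full; the proofs are below) =====
def Claim_equal_find_unique_tsuro_cards : Prop := ∀ (n : Int), Dom_find_unique_tsuro_cards n → Spec_find_unique_tsuro_cards n (find_unique_tsuro_cards n)

-- ===== LEMMAS AND PROOFS =====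

-- proof-side abbreviations
def pkey (p : Int × Int) : Lex (Int × Int) := toLex p
@[reducible] def pvLO : LinearOrder (Lex (Int × Int)) := inferInstance
def pvEnds (M : List (Int × Int)) : List Int := M.flatMap (fun p => [p.1, p.2])
def pvDists (total : Int) (M : List (Int × Int)) : List Int := M.map (fun p => circle_distance p.1 p.2 total)

-- a complete matching of the 2n circle nodes by chords of pairwise distinct circle-lengths
def pvValidM (n : Int) (M : List (Int × Int)) : Prop :=
  (M.length : Int) = n ∧ (∀ p ∈ M, 0 ≤ p.1 ∧ p.1 < p.2 ∧ p.2 < 2 * n) ∧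
  (pvEnds M).Nodup ∧ (pvDists (2 * n) M).Nodup

def pvGood (n : Int) (sol : List (Int × Int)) : Prop :=
  pvValidM n sol ∧ sol.Pairwise (fun p q => pkey p < pkey q)

def InvA (n : Int) (paired : List Bool) (used : PySem.Set Int) (current : List (Int × Int)) : Prop :=
  paired.length = (2 * n).toNat ∧
  (∀ p ∈ current, 0 ≤ p.1 ∧ p.1 < p.2 ∧ p.2 < 2 * n) ∧
  (pvEnds current).Nodup ∧
  (∀ m : Int, 0 ≤ m → m < 2 * n → (pvPairedAt paired m = true ↔ m ∈ pvEnds current)) ∧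
  (pvDists (2 * n) current).Nodup ∧
  (∀ k : Int, k ∈ used ↔ k ∈ pvDists (2 * n) current)

def InvB (n : Int) (paired : List Bool) (pairs : List (Int × Int)) (k : Int) : Prop :=
  paired.length = (2 * n).toNat ∧ 1 ≤ k ∧ k ≤ n + 1 ∧
  (∀ p ∈ pairs, 0 ≤ p.1 ∧ p.1 < p.2 ∧ p.2 < 2 * n) ∧
  (pvEnds pairs).Nodup ∧
  (∀ m : Int, 0 ≤ m → m < 2 * n → (pvPairedAt paired m = true ↔ m ∈ pvEnds pairs)) ∧
  pvDists (2 * n) pairs = PySem.List.pyRange 1 k 1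

-- ---- small facts ----

theorem cd_comm (a b t : Int) : circle_distance a b t = circle_distance b a t := by
  unfold circle_distance; rw [abs_sub_comm]

theorem cd_val (n a b : Int) (hn : 1 ≤ n) (h0 : 0 ≤ a) (hab : a < b) (hb : b < 2 * n) :
    circle_distance a b (2 * n) = min (b - a) (2 * n - (b - a)) := by
  have h1 : |a - b| = b - a := by rw [abs_of_nonpos (by omega)]; ring
  have h2 : PySem.Int.mod (b - a) (2 * n) = b - a := by
    rw [PySem.Int.mod_eq_emod_of_pos (by omega)]
    exact Int.emod_eq_of_lt (by omega) (by omega)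
  simp only [circle_distance, h1, h2]

theorem cd_bounds (n a b : Int) (hn : 1 ≤ n) (h0 : 0 ≤ a) (hab : a < b) (hb : b < 2 * n) :
    1 ≤ circle_distance a b (2 * n) ∧ circle_distance a b (2 * n) ≤ n := by
  rw [cd_val n a b hn h0 hab hb]; omega

theorem cd_cases (n a b k : Int) (hn : 1 ≤ n) (h0 : 0 ≤ a) (hab : a < b) (hb : b < 2 * n)
    (h : circle_distance a b (2 * n) = k) : b - a = k ∨ b - a = 2 * n - k := by
  rw [cd_val n a b hn h0 hab hb] at h; omega

theorem cd_step (n i k : Int) (hn : 1 ≤ n) (hi : 0 ≤ i) (hi2 : i < 2 * n) (hk : 1 ≤ k) (hk2 : k ≤ n) :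
    0 ≤ PySem.Int.mod (i + k) (2 * n) ∧ PySem.Int.mod (i + k) (2 * n) < 2 * n ∧
    PySem.Int.mod (i + k) (2 * n) ≠ i ∧
    circle_distance i (PySem.Int.mod (i + k) (2 * n)) (2 * n) = k := by
  have hpos : (0 : Int) < 2 * n := by omega
  have h0 : 0 ≤ PySem.Int.mod (i + k) (2 * n) := PySem.Int.mod_nonneg _ hpos
  have h1 : PySem.Int.mod (i + k) (2 * n) < 2 * n := PySem.Int.mod_lt _ hpos
  have hval : PySem.Int.mod (i + k) (2 * n) = if i + k < 2 * n then i + k else i + k - 2 * n := by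
    rw [PySem.Int.mod_eq_emod_of_pos hpos]
    split
    · exact Int.emod_eq_of_lt (by omega) (by omega)
    · have h2 : i + k = (i + k - 2 * n) + (2 * n) * 1 := by ring
      conv_lhs => rw [h2]
      rw [Int.add_mul_emod_self_left]
      exact Int.emod_eq_of_lt (by omega) (by omega)
  by_cases hc : i + k < 2 * n
  · have hj2 : PySem.Int.mod (i + k) (2 * n) = i + k := by rw [hval]; simp [hc]
    refine ⟨h0, h1, by omega, ?_⟩
    rw [hj2, cd_val n i (i + k) hn hi (by omega) (by omega)]; omega
  · have hj2 : PySem.Int.mod (i + k) (2 * n) = i + k - 2 * n := by rw [hval]; simp [hc]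
    refine ⟨h0, h1, by omega, ?_⟩
    rw [cd_comm, hj2, cd_val n (i + k - 2 * n) i hn (by omega) (by omega) (by omega)]
    omega

theorem pairedAt_upd (paired : List Bool) (i j : Int) (hi : 0 ≤ i) (hi2 : i < (paired.length : Int))
    (hj : 0 ≤ j) (hj2 : j < (paired.length : Int)) (m : Int) (hm : 0 ≤ m) (hm2 : m < (paired.length : Int)) :
    pvPairedAt (PySem.List.pySetD (PySem.List.pySetD paired i true) j true) m =
      (decide (m = i) || decide (m = j) || pvPairedAt paired m) := by
  rw [PySem.List.pySetD_of_nonneg paired true hi, PySem.List.pySetD_of_nonneg _ true hj]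
  unfold pvPairedAt
  rw [PySem.List.pyGetD_eq_getElem _ _ hm (by simpa using hm2),
      PySem.List.pyGetD_eq_getElem _ _ hm hm2]
  rw [List.getElem_set, List.getElem_set]
  by_cases e1 : m = j
  · subst e1; simp
  · have ne1 : j.toNat ≠ m.toNat := by omega
    by_cases e2 : m = i
    · subst e2; simp [ne1, e1]
    · have ne2 : i.toNat ≠ m.toNat := by omega
      simp [ne1, ne2, e1, e2]

theorem length_upd (paired : List Bool) (i j : Int) :
    (PySem.List.pySetD (PySem.List.pySetD paired i true) j true).length = paired.length := by
  simp [PySem.List.length_pySetD]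

theorem findFree_none (paired : List Bool) (start total : Int)
    (h : pvFindFree paired start total = none) :
    ∀ m : Int, start ≤ m → m < total → pvPairedAt paired m = true := by
  unfold pvFindFree at h
  rw [List.find?_eq_none] at h
  intro m h1 h2
  have h3 := h m (by rw [PySem.List.mem_pyRange_one]; exact ⟨h1, h2⟩)
  simpa using h3

theorem findFree_some (paired : List Bool) (start total i : Int)
    (h : pvFindFree paired start total = some i) :
    start ≤ i ∧ i < total ∧ pvPairedAt paired i = false ∧
    ∀ m : Int, start ≤ m → m < i → pvPairedAt paired m = true := by
  have H : ∀ d : Nat, ∀ start : Int, (total - start).toNat = d →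
      pvFindFree paired start total = some i →
      start ≤ i ∧ i < total ∧ pvPairedAt paired i = false ∧
      ∀ m : Int, start ≤ m → m < i → pvPairedAt paired m = true := by
    intro d
    induction d with
    | zero =>
      intro start hd hh
      exfalso
      unfold pvFindFree at hh
      rw [PySem.List.pyRange_one_eq_nil (by omega)] at hh
      simp at hh
    | succ d ih =>
      intro start hd hh
      unfold pvFindFree at hh
      rw [PySem.List.pyRange_one_cons (by omega)] at hh
      by_cases hp : pvPairedAt paired start = false
      · rw [List.find?_cons_of_pos (by simp [hp])] at hh
        have : start = i := by injection hh
        subst this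
        exact ⟨le_refl _, by omega, hp, fun m hm1 hm2 => by omega⟩
      · have hp' : pvPairedAt paired start = true := by
          revert hp; cases pvPairedAt paired start <;> simp
        rw [List.find?_cons_of_neg (by simp [hp'])] at hh
        have h4 := ih (start + 1) (by omega) (by unfold pvFindFree; exact hh)
        refine ⟨by omega, h4.2.1, h4.2.2.1, ?_⟩
        intro m hm1 hm2
        rcases eq_or_lt_of_le hm1 with he | hl
        · rw [← he]; exact hp'
        · exact h4.2.2.2 m (by omega) hm2
  exact H (total - start).toNat start rfl h

theorem slice_all_true (paired : List Bool) (i : Int) (hi : 0 ≤ i)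
    (h : ∀ m : Int, 0 ≤ m → m ≤ i → pvPairedAt paired m = true) :
    (PySem.List.slice paired none (some (i + 1))).all (fun b => b) = true := by
  rw [PySem.List.slice_to paired (by omega), List.all_eq_true]
  intro x hx
  obtain ⟨idx, hidx, rfl⟩ := List.mem_iff_getElem.mp hx
  have hlen : idx < paired.length := by
    have h6 := hidx; rw [List.length_take] at h6; omega
  have hle : (idx : Int) ≤ i := by
    have h6 := hidx; rw [List.length_take] at h6; omega
  have h5 := h (idx : Int) (by omega) hle
  unfold pvPairedAt at h5
  rw [PySem.List.pyGetD_eq_getElem _ _ (by omega) (by exact_mod_cast hlen)] at h5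
  simp only [List.getElem_take]
  simpa using h5

theorem int_len_le (xs : List Int) (lo hi : Int) (hlo : lo ≤ hi) (hnd : xs.Nodup)
    (hmem : ∀ x ∈ xs, lo ≤ x ∧ x < hi) : (xs.length : Int) ≤ hi - lo := by
  classical
  have h1 : xs.toFinset.card = xs.length := List.toFinset_card_of_nodup hnd
  have h2 : xs.toFinset ⊆ Finset.Ico lo hi := by
    intro x hx
    rw [Finset.mem_Ico]
    exact hmem x (List.mem_toFinset.mp hx)
  have h3 := Finset.card_le_card h2
  rw [h1, Int.card_Ico] at h3
  omega

theorem int_cover (xs : List Int) (lo hi : Int) (hnd : xs.Nodup)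
    (hmem : ∀ x ∈ xs, lo ≤ x ∧ x < hi) (hlen : (xs.length : Int) = hi - lo) :
    ∀ m : Int, lo ≤ m → m < hi → m ∈ xs := by
  classical
  have h1 : xs.toFinset.card = xs.length := List.toFinset_card_of_nodup hnd
  have h2 : xs.toFinset ⊆ Finset.Ico lo hi := by
    intro x hx
    rw [Finset.mem_Ico]
    exact hmem x (List.mem_toFinset.mp hx)
  have h4 : Finset.Ico lo hi ⊆ xs.toFinset := by
    apply Finset.subset_of_eq
    refine (Finset.eq_of_subset_of_card_le h2 ?_).symm
    have h5 := Int.card_Ico lo hi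
    omega
  intro m hm1 hm2
  exact List.mem_toFinset.mp (h4 (Finset.mem_Ico.mpr ⟨hm1, hm2⟩))

theorem int_not_cover (xs : List Int) (lo hi : Int) (hnd : xs.Nodup)
    (hlen : (xs.length : Int) < hi - lo) :
    ∃ m : Int, lo ≤ m ∧ m < hi ∧ m ∉ xs := by
  classical
  by_contra hno
  push Not at hno
  have h2 : Finset.Ico lo hi ⊆ xs.toFinset := by
    intro m hm
    rw [Finset.mem_Ico] at hm
    exact List.mem_toFinset.mpr (hno m hm.1 hm.2)
  have h3 := Finset.card_le_card h2
  rw [List.toFinset_card_of_nodup hnd, Int.card_Ico] at h3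
  omega

theorem pvEnds_append (M N : List (Int × Int)) : pvEnds (M ++ N) = pvEnds M ++ pvEnds N := by
  unfold pvEnds; rw [List.flatMap_append]

theorem length_pvEnds (M : List (Int × Int)) : (pvEnds M).length = 2 * M.length := by
  induction M with
  | nil => simp [pvEnds]
  | cons p M ih => simp only [pvEnds, List.flatMap_cons, List.length_append, List.length_cons] at *; simp at ih ⊢; omega

theorem mem_pvEnds (x : Int) (M : List (Int × Int)) :
    x ∈ pvEnds M ↔ ∃ p ∈ M, x = p.1 ∨ x = p.2 := by
  simp [pvEnds, List.mem_flatMap]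

theorem map_fst_sublist_pvEnds (M : List (Int × Int)) : (M.map Prod.fst).Sublist (pvEnds M) := by
  induction M with
  | nil => simp [pvEnds]
  | cons p M ih =>
    show (p.1 :: M.map Prod.fst).Sublist (p.1 :: p.2 :: pvEnds M)
    exact List.Sublist.cons₂ p.1 (List.Sublist.cons p.2 ih)

theorem pvValidM_perm (n : Int) (M M' : List (Int × Int)) (h : M.Perm M') (hv : pvValidM n M) :
    pvValidM n M' := by
  obtain ⟨h1, h2, h3, h4⟩ := hv
  have hends : (pvEnds M).Perm (pvEnds M') := h.flatMap (fun a _ => List.Perm.refl _)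
  refine ⟨by rw [← h.length_eq]; exact h1, fun p hp => h2 p (h.mem_iff.mpr hp),
    hends.nodup_iff.mp h3, ((h.map _).nodup_iff).mp h4⟩

-- ---- pvSortPairs: bridge to PySem.List.sorted over the lexicographic key ----

theorem pvSortPairs_eq_sorted (M : List (Int × Int)) :
    pvSortPairs M = @PySem.List.sorted _ _ pvLO.toLT pvLO.toDecidableLT M pkey false := by
  rw [@PySem.List.sorted_eq_foldl_insertBy _ _ pvLO.toLT pvLO.toDecidableLT M pkey]
  unfold pvSortPairs
  simp only [PySem.List.sorted2]
  norm_num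
  congr 1
  funext acc x
  congr 1
  funext a b
  show (decide (a.1 < b.1) || (!decide (b.1 < a.1) && decide (a.2 < b.2))) = decide (pkey a < pkey b)
  have hlex : (pkey a < pkey b) ↔ (a.1 < b.1 ∨ (a.1 = b.1 ∧ a.2 < b.2)) := Prod.Lex.lt_iff
  rcases lt_trichotomy a.1 b.1 with h | h | h
  · simp [hlex, h]
  · have h1 : ¬ b.1 < a.1 := by omega
    simp [hlex, h]
  · have h1 : ¬ a.1 < b.1 := by omega
    have h2 : ¬ a.1 = b.1 := by omega
    simp [hlex, h, h1, h2]

theorem pvSortPairs_perm (M : List (Int × Int)) : (pvSortPairs M).Perm M := by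
  exact PySem.List.sorted2_perm M Prod.fst Prod.snd false

theorem pvSortPairs_eq_of_perm (M M' : List (Int × Int)) (h : M.Perm M') :
    pvSortPairs M = pvSortPairs M' := by
  rw [pvSortPairs_eq_sorted, pvSortPairs_eq_sorted]
  exact @PySem.List.sorted_eq_sorted_of_perm _ _ pvLO M M' pkey (fun a b hab => toLex.injective hab) h

theorem pvSortPairs_eq_self (M : List (Int × Int)) (h : M.Pairwise (fun p q => pkey p < pkey q)) :
    pvSortPairs M = M := by
  rw [pvSortPairs_eq_sorted]
  exact @PySem.List.sorted_eq_of_perm_of_pairwise_lt _ _ pvLO M M pkey (List.Perm.refl M) h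

theorem pvSortPairs_strict (M : List (Int × Int)) (hnd : (M.map Prod.fst).Nodup) :
    (pvSortPairs M).Pairwise (fun p q => pkey p < pkey q) := by
  have hperm : (pvSortPairs M).Perm M := pvSortPairs_perm M
  have h1 : (pvSortPairs M).Pairwise (fun p q => pkey p ≤ pkey q) := by
    rw [pvSortPairs_eq_sorted]
    exact @PySem.List.sorted_pairwise _ _ pvLO M pkey
  have h2 : M.Pairwise (fun p q => p.1 ≠ q.1) := List.pairwise_map.mp hnd
  have h3 : (pvSortPairs M).Pairwise (fun p q => p.1 ≠ q.1) :=
    (hperm.pairwise_iff (fun {a b} hab => Ne.symm hab)).mpr h2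
  refine (h1.and h3).imp ?_
  rintro p q ⟨hle, hne⟩
  exact lt_of_le_of_ne hle (fun hc => hne (congrArg Prod.fst (toLex.injective hc)))

theorem pvGood_iff (n : Int) (sol : List (Int × Int)) :
    pvGood n sol ↔ ∃ M, pvValidM n M ∧ sol = pvSortPairs M := by
  constructor
  · rintro ⟨hv, hs⟩
    exact ⟨sol, hv, (pvSortPairs_eq_self sol hs).symm⟩
  · rintro ⟨M, hv, rfl⟩
    have hperm := pvSortPairs_perm M
    refine ⟨pvValidM_perm n M _ hperm.symm hv, ?_⟩
    apply pvSortPairs_strict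
    exact hv.2.2.1.sublist (map_fst_sublist_pvEnds M)

-- ---- step helpers ----

theorem mod_eq_of (a j t : Int) (ht : 0 < t) (hj : 0 ≤ j) (hj2 : j < t)
    (h : a = j ∨ a = j + t ∨ a = j - t) : PySem.Int.mod a t = j := by
  rw [PySem.Int.mod_eq_emod_of_pos ht]
  rcases h with rfl | rfl | rfl
  · exact Int.emod_eq_of_lt hj hj2
  · have h2 : j + t = j + t * 1 := by ring
    rw [h2, Int.add_mul_emod_self_left]
    exact Int.emod_eq_of_lt hj hj2
  · have h2 : j - t = j + t * (-1) := by ring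
    rw [h2, Int.add_mul_emod_self_left]
    exact Int.emod_eq_of_lt hj hj2

theorem sort2_cases (i j : Int) (hij : i ≠ j) :
    ((sort2 i j).1 = i ∧ (sort2 i j).2 = j ∧ i < j) ∨ ((sort2 i j).1 = j ∧ (sort2 i j).2 = i ∧ j < i) := by
  unfold sort2
  rcases lt_or_gt_of_ne hij with h | h
  · left; rw [if_neg (by omega)]; exact ⟨rfl, rfl, h⟩
  · right; rw [if_pos (by omega)]; exact ⟨rfl, rfl, h⟩

theorem cd_sort2 (i j t : Int) : circle_distance (sort2 i j).1 (sort2 i j).2 t = circle_distance i j t := by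
  unfold sort2
  split
  · rw [cd_comm]
  · rfl

theorem ends_bounds (n : Int) (M : List (Int × Int)) (hb : ∀ p ∈ M, 0 ≤ p.1 ∧ p.1 < p.2 ∧ p.2 < 2 * n) :
    ∀ x ∈ pvEnds M, 0 ≤ x ∧ x < 2 * n := by
  intro x hx
  obtain ⟨p, hp, hxp⟩ := (mem_pvEnds x M).mp hx
  have h2 := hb p hp
  rcases hxp with rfl | rfl <;> omega

theorem lenM_le (n : Int) (hn : 1 ≤ n) (M : List (Int × Int))
    (hb : ∀ p ∈ M, 0 ≤ p.1 ∧ p.1 < p.2 ∧ p.2 < 2 * n) (hnd : (pvEnds M).Nodup) :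
    (M.length : Int) ≤ n := by
  have h1 := int_len_le (pvEnds M) 0 (2 * n) (by omega) hnd
    (fun x hx => by have h2 := ends_bounds n M hb x hx; omega)
  have h2 := length_pvEnds M
  omega

theorem notin_ends (n : Int) (paired : List Bool) (current : List (Int × Int)) (m : Int)
    (hIff : ∀ m : Int, 0 ≤ m → m < 2 * n → (pvPairedAt paired m = true ↔ m ∈ pvEnds current))
    (hm : 0 ≤ m) (hm2 : m < 2 * n) (hfree : pvPairedAt paired m = false) : m ∉ pvEnds current := by
  intro hc
  rw [← hIff m hm hm2] at hc
  rw [hfree] at hc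
  exact Bool.false_ne_true hc

-- one matching step preserves the common state invariant
theorem state_step (n : Int) (hn : 1 ≤ n) (paired : List Bool) (current : List (Int × Int)) (i j : Int)
    (hplen : paired.length = (2 * n).toNat)
    (hcur : ∀ p ∈ current, 0 ≤ p.1 ∧ p.1 < p.2 ∧ p.2 < 2 * n)
    (hendnd : (pvEnds current).Nodup)
    (hIff : ∀ m : Int, 0 ≤ m → m < 2 * n → (pvPairedAt paired m = true ↔ m ∈ pvEnds current))
    (hi : 0 ≤ i) (hi2 : i < 2 * n) (hj : 0 ≤ j) (hj2 : j < 2 * n) (hij : j ≠ i)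
    (hifree : pvPairedAt paired i = false) (hjfree : pvPairedAt paired j = false) :
    (PySem.List.pySetD (PySem.List.pySetD paired i true) j true).length = (2 * n).toNat ∧
    (∀ p ∈ current ++ [sort2 i j], 0 ≤ p.1 ∧ p.1 < p.2 ∧ p.2 < 2 * n) ∧
    (pvEnds (current ++ [sort2 i j])).Nodup ∧
    (∀ m : Int, 0 ≤ m → m < 2 * n →
      (pvPairedAt (PySem.List.pySetD (PySem.List.pySetD paired i true) j true) m = true ↔
        m ∈ pvEnds (current ++ [sort2 i j]))) := by
  have hine : i ∉ pvEnds current := notin_ends n paired current i hIff hi hi2 hifree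
  have hjne : j ∉ pvEnds current := notin_ends n paired current j hIff hj hj2 hjfree
  have hends1 : pvEnds (current ++ [sort2 i j]) = pvEnds current ++ [(sort2 i j).1, (sort2 i j).2] := by
    rw [pvEnds_append]; rfl
  have hsc := sort2_cases i j (fun h => hij h.symm)
  refine ⟨length_upd paired i j ▸ hplen, ?_, ?_, ?_⟩
  · intro p hp
    rcases List.mem_append.mp hp with h | h
    · exact hcur p h
    · have hps : p = sort2 i j := List.mem_singleton.mp h
      subst hps
      rcases hsc with ⟨h1, h2, h3⟩ | ⟨h1, h2, h3⟩ <;> rw [h1, h2] <;> omega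
  · rw [hends1]
    rw [List.nodup_append]
    refine ⟨hendnd, ?_, ?_⟩
    · rcases hsc with ⟨h1, h2, h3⟩ | ⟨h1, h2, h3⟩ <;> simp [h1, h2] <;> omega
    · intro x hx b hb
      rcases hsc with ⟨h1, h2, _⟩ | ⟨h1, h2, _⟩ <;> rw [h1, h2] at hb <;>
        simp only [List.mem_cons, List.not_mem_nil, or_false] at hb <;>
        rcases hb with rfl | rfl <;> exact fun hq => (by subst hq; first | exact hine hx | exact hjne hx)
  · intro m hm hm2
    rw [pairedAt_upd paired i j hi (by omega) hj (by omega) m hm (by omega)]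
    rw [hends1, List.mem_append]
    have hIm := hIff m hm hm2
    constructor
    · intro hb
      simp only [Bool.or_eq_true, decide_eq_true_eq] at hb
      rcases hb with (rfl | rfl) | hb
      · right; rcases hsc with ⟨h1, h2, _⟩ | ⟨h1, h2, _⟩ <;> simp [h1, h2]
      · right; rcases hsc with ⟨h1, h2, _⟩ | ⟨h1, h2, _⟩ <;> simp [h1, h2]
      · left; exact hIm.mp hb
    · intro hb
      simp only [Bool.or_eq_true, decide_eq_true_eq]
      rcases hb with hb | hb
      · exact Or.inr (hIm.mpr hb)
      · rcases hsc with ⟨h1, h2, _⟩ | ⟨h1, h2, _⟩ <;> rw [h1, h2] at hb <;>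
          simp only [List.mem_cons] at hb <;> tauto

-- ---- characterization of A's search ----

theorem soundA (n : Int) (hn : 1 ≤ n) :
    ∀ (fuel : Nat) (paired : List Bool) (used : PySem.Set Int) (current : List (Int × Int)) sol,
      InvA n paired used current →
      sol ∈ pvBacktrackA n (2 * n) fuel paired used current 0 →
      ∃ ext, pvValidM n (current ++ ext) ∧ sol = pvSortPairs (current ++ ext) := by
  intro fuel
  induction fuel with
  | zero =>
    intro paired used current sol hInv hmem
    simp [pvBacktrackA] at hmem
  | succ fuel ih =>
    intro paired used current sol hInv hmem
    obtain ⟨hplen, hcur, hendnd, hpairIff, hdistnd, husedIff⟩ := hInv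
    simp only [pvBacktrackA] at hmem
    by_cases hlen : (current.length : Int) = n
    · rw [if_pos hlen, List.mem_singleton] at hmem
      refine ⟨[], ?_, by rw [List.append_nil]; exact hmem⟩
      rw [List.append_nil]
      exact ⟨hlen, hcur, hendnd, hdistnd⟩
    · rw [if_neg hlen] at hmem
      cases hfind : pvFindFree paired 0 (2 * n) with
      | none => rw [hfind] at hmem; simp at hmem
      | some i =>
        rw [hfind] at hmem
        obtain ⟨h0i, hi2, hifree, hmin⟩ := findFree_some paired 0 (2 * n) i hfind
        simp only [List.mem_flatMap, List.mem_ite_nil_left] at hmem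
        obtain ⟨k, hkmem, hknot, dir, hdirmem, hguard, hcd, hrec⟩ := hmem
        have hkb := PySem.List.mem_pyRange_one.mp hkmem
        set jv := PySem.Int.mod (i + dir * k) (2 * n) with hjv
        simp only [Bool.or_eq_true, decide_eq_true_eq, not_or, Bool.not_eq_true] at hguard
        obtain ⟨hji, hjfree⟩ := hguard
        rw [not_not] at hcd
        have hj0 : 0 ≤ jv := PySem.Int.mod_nonneg _ (by omega)
        have hj2 : jv < 2 * n := PySem.Int.mod_lt _ (by omega)
        have hknotd : k ∉ pvDists (2 * n) current := by
          intro hc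
          exact hknot ((PySem.Set.contains_iff used k).mpr ((husedIff k).mpr hc))
        have hall : ∀ m : Int, 0 ≤ m → m ≤ i →
            pvPairedAt (PySem.List.pySetD (PySem.List.pySetD paired i true) jv true) m = true := by
          intro m hm hmi
          rw [pairedAt_upd paired i jv h0i (by rw [hplen]; omega) hj0
            (by rw [hplen]; omega) m hm (by rw [hplen]; omega)]
          rcases eq_or_lt_of_le hmi with rfl | hlt
          · simp
          · simp [hmin m hm hlt]
        rw [if_pos (slice_all_true _ i h0i hall)] at hrec
        have hstep := state_step n hn paired current i jv hplen hcur hendnd hpairIff h0i hi2 hj0 hj2 hji hifree hjfree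
        obtain ⟨s1, s2, s3, s4⟩ := hstep
        have hd : pvDists (2 * n) (current ++ [sort2 i jv]) = pvDists (2 * n) current ++ [k] := by
          simp [pvDists, cd_sort2, hcd]
        have hInv' : InvA n (PySem.List.pySetD (PySem.List.pySetD paired i true) jv true)
            (used.add k) (current ++ [sort2 i jv]) := by
          refine ⟨s1, s2, s3, s4, ?_, ?_⟩
          · rw [hd, List.nodup_append]
            refine ⟨hdistnd, List.nodup_singleton _, ?_⟩
            intro a ha b hb
            rw [List.mem_singleton] at hb
            subst hb
            exact fun h => hknotd (h ▸ ha)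
          · intro k'
            rw [PySem.Set.mem_add, hd, List.mem_append, List.mem_singleton, husedIff k']
        obtain ⟨ext', hval', heq'⟩ := ih _ (used.add k) (current ++ [sort2 i jv]) sol hInv' hrec
        have hassoc : current ++ sort2 i jv :: ext' = (current ++ [sort2 i jv]) ++ ext' := by simp
        exact ⟨sort2 i jv :: ext', by rw [hassoc]; exact hval', by rw [hassoc]; exact heq'⟩

theorem completeA (n : Int) (hn : 1 ≤ n) :
    ∀ (fuel : Nat) (paired : List Bool) (used : PySem.Set Int) (current : List (Int × Int)) ext,
      InvA n paired used current → n.toNat + 1 ≤ fuel + current.length →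
      pvValidM n (current ++ ext) →
      pvSortPairs (current ++ ext) ∈ pvBacktrackA n (2 * n) fuel paired used current 0 := by
  intro fuel
  induction fuel with
  | zero =>
    intro paired used current ext hInv hfuel hval
    exfalso
    obtain ⟨hplen, hcur, hendnd, hpairIff, hdistnd, husedIff⟩ := hInv
    have h1 := lenM_le n hn current hcur hendnd
    omega
  | succ fuel ih =>
    intro paired used current ext hInv hfuel hval
    obtain ⟨hplen, hcur, hendnd, hpairIff, hdistnd, husedIff⟩ := hInv
    simp only [pvBacktrackA]
    by_cases hlen : (current.length : Int) = n
    · rw [if_pos hlen]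
      have hext : ext = [] := by
        have h1 := hval.1
        rw [List.length_append] at h1
        push_cast at h1
        have h2 : ext.length = 0 := by omega
        exact List.eq_nil_of_length_eq_zero h2
      subst hext
      simp
    · rw [if_neg hlen]
      have hlenle : (current.length : Int) ≤ n := lenM_le n hn current hcur hendnd
      have hlt : (current.length : Int) < n := lt_of_le_of_ne hlenle hlen
      obtain ⟨hvl, hvb, hvend, hvdist⟩ := hval
      have hfree : ∃ m, 0 ≤ m ∧ m < 2 * n ∧ m ∉ pvEnds current := by
        apply int_not_cover (pvEnds current) 0 (2 * n) hendnd
        rw [length_pvEnds]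
        push_cast
        omega
      cases hfind : pvFindFree paired 0 (2 * n) with
      | none =>
        exfalso
        obtain ⟨m, hm0, hm2, hmne⟩ := hfree
        have h2 := findFree_none paired 0 (2 * n) hfind m hm0 hm2
        exact hmne ((hpairIff m hm0 hm2).mp h2)
      | some i =>
        obtain ⟨h0i, hi2, hifree, hmin⟩ := findFree_some paired 0 (2 * n) i hfind
        have hine : i ∉ pvEnds current := notin_ends n paired current i hpairIff h0i hi2 hifree
        have hcov : i ∈ pvEnds (current ++ ext) := by
          apply int_cover (pvEnds (current ++ ext)) 0 (2 * n) hvend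
            (fun x hx => by have h3 := ends_bounds n _ hvb x hx; omega) ?_ i h0i hi2
          rw [length_pvEnds]
          push_cast
          omega
        have hiext : i ∈ pvEnds ext := by
          rw [pvEnds_append, List.mem_append] at hcov
          tauto
        obtain ⟨p, hpext, hpi⟩ := (mem_pvEnds i ext).mp hiext
        have hpmem : p ∈ current ++ ext := List.mem_append_right _ hpext
        have hpb := hvb p hpmem
        set k := circle_distance p.1 p.2 (2 * n) with hk
        have hkb := cd_bounds n p.1 p.2 hn (by omega) (by omega) (by omega)
        have hcd2 := cd_cases n p.1 p.2 k hn (by omega) (by omega) (by omega) hk.symm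
        obtain ⟨j, hij, hjb1, hjb2, hsort, hcdij, hjext, dir, hdirmem, hjv⟩ :
            ∃ j, j ≠ i ∧ 0 ≤ j ∧ j < 2 * n ∧ sort2 i j = p ∧
              circle_distance i j (2 * n) = k ∧ j ∈ pvEnds ext ∧
              ∃ dir ∈ ([1, -1] : List Int), PySem.Int.mod (i + dir * k) (2 * n) = j := by
          rcases hpi with h | h
          · refine ⟨p.2, by omega, by omega, by omega, ?_, by rw [h], ?_, ?_⟩
            · unfold sort2
              rw [if_neg (by omega), h]
            · exact (mem_pvEnds _ ext).mpr ⟨p, hpext, Or.inr rfl⟩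
            · rcases hcd2 with hc | hc
              · exact ⟨1, by simp, mod_eq_of _ _ _ (by omega) (by omega) (by omega) (Or.inl (by omega))⟩
              · exact ⟨-1, by simp, mod_eq_of _ _ _ (by omega) (by omega) (by omega) (Or.inr (Or.inr (by omega)))⟩
          · refine ⟨p.1, by omega, by omega, by omega, ?_, by rw [h, cd_comm], ?_, ?_⟩
            · unfold sort2
              rw [if_pos (by omega), h]
            · exact (mem_pvEnds _ ext).mpr ⟨p, hpext, Or.inl rfl⟩
            · rcases hcd2 with hc | hc
              · exact ⟨-1, by simp, mod_eq_of _ _ _ (by omega) (by omega) (by omega) (Or.inl (by omega))⟩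
              · exact ⟨1, by simp, mod_eq_of _ _ _ (by omega) (by omega) (by omega) (Or.inr (Or.inl (by omega)))⟩
        have hkdext : k ∈ pvDists (2 * n) ext := List.mem_map.mpr ⟨p, hpext, hk.symm⟩
        have hdsplit : pvDists (2 * n) (current ++ ext) = pvDists (2 * n) current ++ pvDists (2 * n) ext := by
          simp [pvDists]
        have hkdcur : k ∉ pvDists (2 * n) current := by
          rw [hdsplit, List.nodup_append] at hvdist
          exact fun hc => hvdist.2.2 k hc k hkdext rfl
        have hkused : PySem.Set.contains used k = false := by
          cases hq : PySem.Set.contains used k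
          · rfl
          · exact absurd ((husedIff k).mp ((PySem.Set.contains_iff used k).mp hq)) hkdcur
        have hedisj : ∀ a ∈ pvEnds current, ∀ b ∈ pvEnds ext, a ≠ b := by
          rw [pvEnds_append, List.nodup_append] at hvend
          exact hvend.2.2
        have hjne : j ∉ pvEnds current := fun hc => hedisj j hc j hjext rfl
        have hjfree : pvPairedAt paired j = false := by
          cases hq : pvPairedAt paired j
          · rfl
          · exact absurd ((hpairIff j hjb1 hjb2).mp hq) hjne
        have hknmem : k ∉ used := by
          intro hc
          rw [(PySem.Set.contains_iff used k).mpr hc] at hkused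
          simp at hkused
        simp only [List.mem_flatMap, List.mem_ite_nil_left]
        refine ⟨k, PySem.List.mem_pyRange_one.mpr ⟨by omega, by omega⟩, by simpa using hknmem, dir, hdirmem, ?_⟩
        rw [hjv]
        refine ⟨by simp [hij, hjfree], not_not_intro hcdij, ?_⟩
        have hall : ∀ m : Int, 0 ≤ m → m ≤ i →
            pvPairedAt (PySem.List.pySetD (PySem.List.pySetD paired i true) j true) m = true := by
          intro m hm hmi
          rw [pairedAt_upd paired i j h0i (by rw [hplen]; omega) hjb1
            (by rw [hplen]; omega) m hm (by rw [hplen]; omega)]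
          rcases eq_or_lt_of_le hmi with rfl | hlt2
          · simp
          · simp [hmin m hm hlt2]
        rw [if_pos (slice_all_true _ i h0i hall)]
        have hstep := state_step n hn paired current i j hplen hcur hendnd hpairIff h0i hi2 hjb1 hjb2 hij hifree hjfree
        obtain ⟨s1, s2, s3, s4⟩ := hstep
        have hd : pvDists (2 * n) (current ++ [sort2 i j]) = pvDists (2 * n) current ++ [k] := by
          simp [pvDists, cd_sort2, hcdij]
        have hInv' : InvA n (PySem.List.pySetD (PySem.List.pySetD paired i true) j true)
            (used.add k) (current ++ [sort2 i j]) := by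
          refine ⟨s1, s2, s3, s4, ?_, ?_⟩
          · rw [hd, List.nodup_append]
            refine ⟨hdistnd, List.nodup_singleton _, ?_⟩
            intro a ha b hb
            rw [List.mem_singleton] at hb
            subst hb
            exact fun h => hkdcur (h ▸ ha)
          · intro k'
            rw [PySem.Set.mem_add, hd, List.mem_append, List.mem_singleton, husedIff k']
        have hperm : ((current ++ [sort2 i j]) ++ ext.erase p).Perm (current ++ ext) := by
          rw [hsort]
          have h1 : (current ++ [p]) ++ ext.erase p = current ++ (p :: ext.erase p) := by simp
          rw [h1]
          exact List.Perm.append_left current (List.perm_cons_erase hpext).symm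
        have hval' : pvValidM n ((current ++ [sort2 i j]) ++ ext.erase p) :=
          pvValidM_perm n _ _ hperm.symm ⟨hvl, hvb, hvend, hvdist⟩
        have hfuel' : n.toNat + 1 ≤ fuel + (current ++ [sort2 i j]).length := by
          rw [List.length_append]
          simp only [List.length_cons, List.length_nil]
          omega
        have hmem2 := ih _ (used.add k) (current ++ [sort2 i j]) (ext.erase p) hInv' hfuel' hval'
        have heq2 : pvSortPairs (current ++ ext) = pvSortPairs ((current ++ [sort2 i j]) ++ ext.erase p) :=
          pvSortPairs_eq_of_perm _ _ hperm.symm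
        rw [heq2]
        exact hmem2

-- ---- characterization of B's search ----

theorem soundB (n : Int) (hn : 1 ≤ n) :
    ∀ (fuel : Nat) (paired : List Bool) (pairs : List (Int × Int)) (k : Int) sol,
      InvB n paired pairs k →
      sol ∈ pvPlaceB n (2 * n) fuel paired pairs k →
      ∃ ext, pvValidM n (pairs ++ ext) ∧ sol = pvSortPairs (pairs ++ ext) := by
  intro fuel
  induction fuel with
  | zero =>
    intro paired pairs k sol hInv hmem
    simp [pvPlaceB] at hmem
  | succ fuel ih =>
    intro paired pairs k sol hInv hmem
    obtain ⟨hplen, hk1, hk2, hcur, hendnd, hpairIff, hdist⟩ := hInv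
    have hplength : (pairs.length : Int) = k - 1 := by
      have h1 : (pvDists (2 * n) pairs).length = pairs.length := List.length_map _
      rw [hdist, PySem.List.length_pyRange_one] at h1
      omega
    simp only [pvPlaceB] at hmem
    by_cases hnk : n < k
    · rw [if_pos hnk, List.mem_singleton] at hmem
      refine ⟨[], ?_, by rw [List.append_nil]; exact hmem⟩
      rw [List.append_nil]
      exact ⟨by omega, hcur, hendnd, by rw [hdist]; exact PySem.List.nodup_pyRange_one _ _⟩
    · rw [if_neg hnk] at hmem
      simp only [List.mem_flatMap, List.mem_ite_nil_left] at hmem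
      obtain ⟨i, himem, hguard, hrec⟩ := hmem
      have hib := PySem.List.mem_pyRange_one.mp himem
      have hi0 : 0 ≤ i := hib.1
      have hilt : i < 2 * n := by
        have h2 := hib.2
        split_ifs at h2 <;> omega
      set jv := PySem.Int.mod (i + k) (2 * n) with hjv
      obtain ⟨hj0, hj2, hjne, hcd⟩ := cd_step n i k hn hi0 hilt (by omega) (by omega)
      simp only [← hjv] at hj0 hj2 hjne hcd
      simp only [Bool.or_eq_true, not_or, Bool.not_eq_true] at hguard
      obtain ⟨hifree, hjfree⟩ := hguard
      obtain ⟨s1, s2, s3, s4⟩ :=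
        state_step n hn paired pairs i jv hplen hcur hendnd hpairIff hi0 hilt hj0 hj2 hjne hifree hjfree
      have hd : pvDists (2 * n) (pairs ++ [sort2 i jv]) = PySem.List.pyRange 1 (k + 1) 1 := by
        have h3 : pvDists (2 * n) (pairs ++ [sort2 i jv]) = pvDists (2 * n) pairs ++ [k] := by
          simp [pvDists, cd_sort2, hcd]
        rw [h3, hdist, ← PySem.List.pyRange_one_succ_right (by omega)]
      have hpair_eq : (if i < jv then (i, jv) else (jv, i)) = sort2 i jv := by
        unfold sort2
        rcases lt_trichotomy i jv with h | h | h
        · rw [if_pos h, if_neg (by omega)]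
        · exact absurd h.symm hjne
        · rw [if_neg (by omega), if_pos (by omega)]
      rw [hpair_eq] at hrec
      have hInv' : InvB n (PySem.List.pySetD (PySem.List.pySetD paired i true) jv true)
          (pairs ++ [sort2 i jv]) (k + 1) := ⟨s1, by omega, by omega, s2, s3, s4, hd⟩
      obtain ⟨ext', hval', heq'⟩ := ih _ (pairs ++ [sort2 i jv]) (k + 1) sol hInv' hrec
      have hassoc : pairs ++ sort2 i jv :: ext' = (pairs ++ [sort2 i jv]) ++ ext' := by simp
      exact ⟨sort2 i jv :: ext', by rw [hassoc]; exact hval', by rw [hassoc]; exact heq'⟩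

theorem completeB (n : Int) (hn : 1 ≤ n) :
    ∀ (fuel : Nat) (paired : List Bool) (pairs : List (Int × Int)) (k : Int) ext,
      InvB n paired pairs k → (n + 2 - k).toNat ≤ fuel →
      pvValidM n (pairs ++ ext) →
      pvSortPairs (pairs ++ ext) ∈ pvPlaceB n (2 * n) fuel paired pairs k := by
  intro fuel
  induction fuel with
  | zero =>
    intro paired pairs k ext hInv hfuel hval
    exfalso
    obtain ⟨hplen, hk1, hk2, hcur, hendnd, hpairIff, hdist⟩ := hInv
    omega
  | succ fuel ih =>
    intro paired pairs k ext hInv hfuel hval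
    obtain ⟨hplen, hk1, hk2, hcur, hendnd, hpairIff, hdist⟩ := hInv
    have hplength : (pairs.length : Int) = k - 1 := by
      have h1 : (pvDists (2 * n) pairs).length = pairs.length := List.length_map _
      rw [hdist, PySem.List.length_pyRange_one] at h1
      omega
    simp only [pvPlaceB]
    by_cases hnk : n < k
    · rw [if_pos hnk]
      have hext : ext = [] := by
        have h1 := hval.1
        rw [List.length_append] at h1
        push_cast at h1
        exact List.eq_nil_of_length_eq_zero (by omega)
      subst hext
      simp
    · rw [if_neg hnk]
      obtain ⟨hvl, hvb, hvend, hvdist⟩ := hval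
      have hvl' : (pairs.length : Int) + (ext.length : Int) = n := by
        rw [List.length_append] at hvl
        push_cast at hvl
        omega
      have hdsplit : pvDists (2 * n) (pairs ++ ext) =
          pvDists (2 * n) pairs ++ pvDists (2 * n) ext := by simp [pvDists]
      have hvdist' := hvdist
      rw [hdsplit, List.nodup_append] at hvdist'
      have hextnd : (pvDists (2 * n) ext).Nodup := hvdist'.2.1
      have hbounds : ∀ d ∈ pvDists (2 * n) ext, k ≤ d ∧ d < n + 1 := by
        intro d hd
        obtain ⟨q, hq, rfl⟩ := List.mem_map.mp hd
        have hqb := hvb q (List.mem_append_right _ hq)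
        have hcb := cd_bounds n q.1 q.2 hn (by omega) (by omega) (by omega)
        have hnotr : circle_distance q.1 q.2 (2 * n) ∉ PySem.List.pyRange 1 k 1 := by
          intro hc
          exact hvdist'.2.2 _ (hdist ▸ hc) _ (List.mem_map.mpr ⟨q, hq, rfl⟩) rfl
        have h5 : ¬ (1 ≤ circle_distance q.1 q.2 (2 * n) ∧ circle_distance q.1 q.2 (2 * n) < k) :=
          fun hc => hnotr (PySem.List.mem_pyRange_one.mpr hc)
        omega
      have hcover : k ∈ pvDists (2 * n) ext := by
        apply int_cover (pvDists (2 * n) ext) k (n + 1) hextnd hbounds ?_ k (le_refl k) (by omega)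
        have h6 : (pvDists (2 * n) ext).length = ext.length := List.length_map _
        rw [h6]
        omega
      obtain ⟨p, hpext, hpk⟩ := List.mem_map.mp hcover
      have hpb := hvb p (List.mem_append_right _ hpext)
      have hedisj : ∀ a ∈ pvEnds pairs, ∀ b ∈ pvEnds ext, a ≠ b := by
        rw [pvEnds_append, List.nodup_append] at hvend
        exact hvend.2.2
      have hp1e : p.1 ∈ pvEnds ext := (mem_pvEnds _ _).mpr ⟨p, hpext, Or.inl rfl⟩
      have hp2e : p.2 ∈ pvEnds ext := (mem_pvEnds _ _).mpr ⟨p, hpext, Or.inr rfl⟩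
      have hfree : ∀ x, x ∈ pvEnds ext → 0 ≤ x → x < 2 * n → pvPairedAt paired x = false := by
        intro x hx h1 h2
        cases hq : pvPairedAt paired x
        · rfl
        · exact absurd rfl (hedisj x ((hpairIff x h1 h2).mp hq) x hx)
      have hcdc := cd_cases n p.1 p.2 k hn (by omega) (by omega) (by omega) hpk
      obtain ⟨i, jv, hi0, hlim, hjv0, hjv2n, hi2n, hjvne, hjveq, hsort, hiteq, hie, hjve⟩ :
          ∃ i jv, 0 ≤ i ∧ (i < if k < n then 2 * n else n) ∧ 0 ≤ jv ∧ jv < 2 * n ∧ i < 2 * n ∧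
            jv ≠ i ∧ PySem.Int.mod (i + k) (2 * n) = jv ∧ sort2 i jv = p ∧
            (if i < jv then (i, jv) else (jv, i)) = p ∧ i ∈ pvEnds ext ∧ jv ∈ pvEnds ext := by
        by_cases hkc : p.2 - p.1 = k
        · refine ⟨p.1, p.2, by omega, by split_ifs <;> omega, by omega, by omega, by omega, by omega,
            mod_eq_of _ _ _ (by omega) (by omega) (by omega) (Or.inl (by omega)), ?_, ?_, hp1e, hp2e⟩
          · unfold sort2
            rw [if_neg (by omega)]
          · rw [if_pos hpb.2.1]
        · have hc : p.2 - p.1 = 2 * n - k := by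
            rcases hcdc with h | h
            · exact absurd h hkc
            · exact h
          have hkn : k < n := by omega
          refine ⟨p.2, p.1, by omega, by rw [if_pos hkn]; omega, by omega, by omega, by omega, by omega,
            mod_eq_of _ _ _ (by omega) (by omega) (by omega) (Or.inr (Or.inl (by omega))), ?_, ?_, hp2e, hp1e⟩
          · unfold sort2
            rw [if_pos (by omega)]
          · rw [if_neg (by omega)]
      have hif : pvPairedAt paired i = false := hfree i hie hi0 hi2n
      have hjf : pvPairedAt paired jv = false := hfree jv hjve hjv0 hjv2n
      simp only [List.mem_flatMap, List.mem_ite_nil_left]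
      refine ⟨i, PySem.List.mem_pyRange_one.mpr ⟨hi0, hlim⟩, ?_, ?_⟩
      · rw [hjveq]
        simp [hif, hjf]
      · rw [hjveq, hiteq]
        obtain ⟨s1, s2, s3, s4⟩ :=
          state_step n hn paired pairs i jv hplen hcur hendnd hpairIff hi0 hi2n hjv0 hjv2n hjvne hif hjf
        rw [hsort] at s2 s3 s4
        have hd : pvDists (2 * n) (pairs ++ [p]) = PySem.List.pyRange 1 (k + 1) 1 := by
          have h3 : pvDists (2 * n) (pairs ++ [p]) = pvDists (2 * n) pairs ++ [k] := by
            simp [pvDists, hpk]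
          rw [h3, hdist, ← PySem.List.pyRange_one_succ_right (by omega)]
        have hInv' : InvB n (PySem.List.pySetD (PySem.List.pySetD paired i true) jv true)
            (pairs ++ [p]) (k + 1) := ⟨s1, by omega, by omega, s2, s3, s4, hd⟩
        have hperm : ((pairs ++ [p]) ++ ext.erase p).Perm (pairs ++ ext) := by
          have h1 : (pairs ++ [p]) ++ ext.erase p = pairs ++ (p :: ext.erase p) := by simp
          rw [h1]
          exact List.Perm.append_left pairs (List.perm_cons_erase hpext).symm
        have hval' : pvValidM n ((pairs ++ [p]) ++ ext.erase p) :=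
          pvValidM_perm n _ _ hperm.symm ⟨hvl, hvb, hvend, hvdist⟩
        have hfuel' : (n + 2 - (k + 1)).toNat ≤ fuel := by omega
        have hmem2 := ih _ (pairs ++ [p]) (k + 1) (ext.erase p) hInv' hfuel' hval'
        have heq2 : pvSortPairs (pairs ++ ext) = pvSortPairs ((pairs ++ [p]) ++ ext.erase p) :=
          pvSortPairs_eq_of_perm _ _ hperm.symm
        rw [heq2]
        exact hmem2

theorem pairIff_init (n : Int) (m : Int) (hm : 0 ≤ m) (hm2 : m < 2 * n) :
    (pvPairedAt (List.replicate (2 * n).toNat false) m = true ↔ m ∈ pvEnds []) := by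
  unfold pvPairedAt
  rw [PySem.List.pyGetD_eq_getElem _ _ hm (by simp; omega)]
  simp [pvEnds]

theorem solsA_char (n : Int) (hn : 1 ≤ n) (sol : List (Int × Int)) :
    sol ∈ pvBacktrackA n (2 * n) (n.toNat + 1) (List.replicate (2 * n).toNat false) PySem.Set.empty [] 0 ↔
      pvGood n sol := by
  have hInv0 : InvA n (List.replicate (2 * n).toNat false) PySem.Set.empty [] := by
    refine ⟨List.length_replicate, by simp, by simp [pvEnds], pairIff_init n, by simp [pvDists],
      fun k => by simp [pvDists, PySem.Set.empty]⟩
  constructor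
  · intro h
    obtain ⟨ext, hval, heq⟩ := soundA n hn _ _ _ _ sol hInv0 h
    rw [List.nil_append] at hval heq
    exact (pvGood_iff n sol).mpr ⟨ext, hval, heq⟩
  · intro h
    obtain ⟨M, hval, rfl⟩ := (pvGood_iff n sol).mp h
    have h2 := completeA n hn (n.toNat + 1) _ _ [] M hInv0 (by simp) (by rwa [List.nil_append])
    rwa [List.nil_append] at h2

theorem solsB_char (n : Int) (hn : 1 ≤ n) (sol : List (Int × Int)) :
    sol ∈ pvPlaceB n (2 * n) (n.toNat + 1) (List.replicate (2 * n).toNat false) [] 1 ↔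
      pvGood n sol := by
  have hInv0 : InvB n (List.replicate (2 * n).toNat false) [] 1 := by
    refine ⟨List.length_replicate, le_refl 1, by omega, by simp, by simp [pvEnds], pairIff_init n, ?_⟩
    show pvDists (2 * n) [] = PySem.List.pyRange 1 1 1
    rw [PySem.List.pyRange_one_eq_nil (le_refl 1)]
    rfl
  constructor
  · intro h
    obtain ⟨ext, hval, heq⟩ := soundB n hn _ _ _ _ sol hInv0 h
    rw [List.nil_append] at hval heq
    exact (pvGood_iff n sol).mpr ⟨ext, hval, heq⟩
  · intro h
    obtain ⟨M, hval, rfl⟩ := (pvGood_iff n sol).mp h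
    have h2 := completeB n hn (n.toNat + 1) _ [] 1 M hInv0 (by omega) (by rwa [List.nil_append])
    rwa [List.nil_append] at h2

-- ---- the frozenset dedup of A keeps membership ----

theorem good_inj (n : Int) :
    ∀ x y : List (Int × Int), pvGood n x → pvGood n y → (∀ a, a ∈ x ↔ a ∈ y) → x = y := by
  intro x y hx hy hmem
  have hndx : x.Nodup := hx.2.imp (fun {a b} h => fun he => absurd (he ▸ h) (lt_irrefl _))
  have hndy : y.Nodup := hy.2.imp (fun {a b} h => fun he => absurd (he ▸ h) (lt_irrefl _))
  have hperm : x.Perm y := (List.perm_ext_iff_of_nodup hndx hndy).mpr hmem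
  calc x = pvSortPairs x := (pvSortPairs_eq_self x hx.2).symm
  _ = pvSortPairs y := pvSortPairs_eq_of_perm _ _ hperm
  _ = y := pvSortPairs_eq_self y hy.2

theorem clean_loop_mem (n : Int) :
    ∀ (sols : List (List (Int × Int))) (seen : List (PySem.Set (Int × Int)))
      (acc : List (List (Int × Int))) (x : List (Int × Int)),
      (∀ s ∈ sols, pvGood n s) →
      (x ∈ (sols.foldl (fun st sol =>
          let fs := PySem.Set.ofList sol
          if st.1.any (fun s => PySem.Set.equal s fs) then st
          else (st.1 ++ [fs], st.2 ++ [sol])) (seen, acc)).2 ↔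
        x ∈ acc ∨ (x ∈ sols ∧ seen.any (fun s => PySem.Set.equal s (PySem.Set.ofList x)) = false)) := by
  intro sols
  induction sols with
  | nil =>
    intro seen acc x hP
    simp
  | cons sol rest ih =>
    intro seen acc x hP
    simp only [List.foldl_cons]
    by_cases hc : seen.any (fun s => PySem.Set.equal s (PySem.Set.ofList sol)) = true
    · rw [if_pos hc, ih seen acc x (fun s hs => hP s (List.mem_cons_of_mem _ hs))]
      constructor
      · rintro (h | ⟨h1, h2⟩)
        · exact Or.inl h
        · exact Or.inr ⟨List.mem_cons_of_mem _ h1, h2⟩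
      · rintro (h | ⟨h1, h2⟩)
        · exact Or.inl h
        · rcases List.mem_cons.mp h1 with rfl | h3
          · rw [h2] at hc
            simp at hc
          · exact Or.inr ⟨h3, h2⟩
    · rw [if_neg hc, ih (seen ++ [PySem.Set.ofList sol]) (acc ++ [sol]) x
        (fun s hs => hP s (List.mem_cons_of_mem _ hs))]
      have hsolG : pvGood n sol := hP sol List.mem_cons_self
      constructor
      · rintro (h | ⟨h1, h2⟩)
        · rcases List.mem_append.mp h with h3 | h3
          · exact Or.inl h3
          · rw [List.mem_singleton] at h3
            subst h3
            exact Or.inr ⟨List.mem_cons_self, by simpa using hc⟩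
        · rw [List.any_append] at h2
          obtain ⟨h2a, h2b⟩ := Bool.or_eq_false_iff.mp h2
          exact Or.inr ⟨List.mem_cons_of_mem _ h1, h2a⟩
      · rintro (h | ⟨h1, h2⟩)
        · exact Or.inl (List.mem_append_left _ h)
        · rcases List.mem_cons.mp h1 with rfl | h3
          · exact Or.inl (List.mem_append_right _ (List.mem_singleton.mpr rfl))
          · by_cases he : PySem.Set.equal (PySem.Set.ofList sol) (PySem.Set.ofList x) = true
            · have hxg : pvGood n x := hP x (List.mem_cons_of_mem _ h3)
              have hxs : x = sol := by
                apply good_inj n x sol hxg hsolG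
                intro a
                have h4 := (PySem.Set.equal_iff _ _).mp he a
                rw [PySem.Set.mem_ofList, PySem.Set.mem_ofList] at h4
                exact h4.symm
              subst hxs
              exact Or.inl (List.mem_append_right _ (List.mem_singleton.mpr rfl))
            · refine Or.inr ⟨h3, ?_⟩
              rw [List.any_append]
              refine Bool.or_eq_false_iff.mpr ⟨h2, ?_⟩
              simp only [List.any_cons, List.any_nil, Bool.or_false]
              exact Bool.eq_false_iff.mpr (fun hq => he hq)

theorem cleanA_mem (n : Int) (hn : ¬ n < 1) (x : List (Int × Int)) :
    x ∈ find_all_tsuro_cards n ↔ pvGood n x := by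
  have hn1 : 1 ≤ n := by omega
  unfold find_all_tsuro_cards
  rw [if_neg hn]
  rw [clean_loop_mem n _ [] [] x (fun s hs => (solsA_char n hn1 s).mp hs)]
  simp only [List.not_mem_nil, List.any_nil, false_or, and_true]
  exact solsA_char n hn1 x

-- ---- the pipeline depends only on membership ----

theorem canon_loop_pair (total : Int) :
    ∀ (sols : List (List (Int × Int))) (seen : List (Option (List (Int × Int)))) (acc : List (List (List Int))),
      acc = seen.map (fun c => (c.getD []).map (fun p => [p.1, p.2])) →
      (sols.foldl (fun st sol =>
        let canon := normalize_matching sol total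
        if canon ∈ st.1 then st
        else (st.1 ++ [canon], st.2 ++ [(canon.getD []).map (fun p => [p.1, p.2])])) (seen, acc)).2
      = (sols.foldl (fun st sol =>
        let canon := normalize_matching sol total
        if canon ∈ st.1 then st
        else (st.1 ++ [canon], st.2 ++ [(canon.getD []).map (fun p => [p.1, p.2])])) (seen, acc)).1.map
          (fun c => (c.getD []).map (fun p => [p.1, p.2])) := by
  intro sols
  induction sols with
  | nil =>
    intro seen acc hacc
    simpa using hacc
  | cons sol rest ih =>
    intro seen acc hacc
    simp only [List.foldl_cons]
    by_cases hc : normalize_matching sol total ∈ seen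
    · rw [if_pos hc]
      exact ih seen acc hacc
    · rw [if_neg hc]
      exact ih _ _ (by rw [hacc, List.map_append]; simp)

theorem canon_loop_fst_mem (total : Int) :
    ∀ (sols : List (List (Int × Int))) (seen : List (Option (List (Int × Int)))) (acc : List (List (List Int)))
      (c : Option (List (Int × Int))),
      (c ∈ (sols.foldl (fun st sol =>
        let canon := normalize_matching sol total
        if canon ∈ st.1 then st
        else (st.1 ++ [canon], st.2 ++ [(canon.getD []).map (fun p => [p.1, p.2])])) (seen, acc)).1 ↔
        c ∈ seen ∨ c ∈ sols.map (fun s => normalize_matching s total)) := by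
  intro sols
  induction sols with
  | nil =>
    intro seen acc c
    simp
  | cons sol rest ih =>
    intro seen acc c
    simp only [List.foldl_cons, List.map_cons, List.mem_cons]
    by_cases hc : normalize_matching sol total ∈ seen
    · rw [if_pos hc, ih seen acc c]
      constructor
      · rintro (h | h)
        · exact Or.inl h
        · exact Or.inr (Or.inr h)
      · rintro (h | h | h)
        · exact Or.inl h
        · exact Or.inl (h ▸ hc)
        · exact Or.inr h
    · rw [if_neg hc, ih _ _ c]
      rw [List.mem_append, List.mem_singleton]
      tauto

theorem canon_loop_fst_nodup (total : Int) :
    ∀ (sols : List (List (Int × Int))) (seen : List (Option (List (Int × Int)))) (acc : List (List (List Int))),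
      seen.Nodup →
      (sols.foldl (fun st sol =>
        let canon := normalize_matching sol total
        if canon ∈ st.1 then st
        else (st.1 ++ [canon], st.2 ++ [(canon.getD []).map (fun p => [p.1, p.2])])) (seen, acc)).1.Nodup := by
  intro sols
  induction sols with
  | nil =>
    intro seen acc hnd
    exact hnd
  | cons sol rest ih =>
    intro seen acc hnd
    simp only [List.foldl_cons]
    by_cases hc : normalize_matching sol total ∈ seen
    · rw [if_pos hc]
      exact ih seen acc hnd
    · rw [if_neg hc]
      refine ih _ _ ?_
      rw [List.nodup_append]
      exact ⟨hnd, List.nodup_singleton _, fun a ha b hb => by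
        rw [List.mem_singleton] at hb
        subst hb
        exact fun hq => hc (hq ▸ ha)⟩

theorem sorted_id_congr (l l' : List (List (List Int))) (h : l.Perm l') :
    PySem.List.sorted l (fun x => x) = PySem.List.sorted l' (fun x => x) := by
  have hD : (fun (a b : List (List Int)) => a.decidableLT b) =
      (@LinearOrder.toDecidableLT _ List.instLinearOrder) := by
    funext a b
    exact Subsingleton.elim _ _
  show @PySem.List.sorted _ _ List.instLT (fun a b => a.decidableLT b) l (fun x => x) false =
       @PySem.List.sorted _ _ List.instLT (fun a b => a.decidableLT b) l' (fun x => x) false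
  rw [hD]
  exact @PySem.List.sorted_eq_sorted_of_perm _ _ List.instLinearOrder l l' (fun x => x) (fun _ _ hab => hab) h

theorem pipeline_congr (sols sols' : List (List (Int × Int))) (total : Int)
    (h : ∀ x, x ∈ sols ↔ x ∈ sols') : pvPipeline sols total = pvPipeline sols' total := by
  unfold pvPipeline
  dsimp only
  rw [canon_loop_pair total sols [] [] (by simp), canon_loop_pair total sols' [] [] (by simp)]
  apply sorted_id_congr
  apply List.Perm.map
  apply (List.perm_ext_iff_of_nodup (canon_loop_fst_nodup total sols [] [] (by simp))
    (canon_loop_fst_nodup total sols' [] [] (by simp))).mpr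
  intro c
  rw [canon_loop_fst_mem total sols [] [] c, canon_loop_fst_mem total sols' [] [] c]
  simp only [List.not_mem_nil, false_or, List.mem_map]
  constructor
  · rintro ⟨x, hx, rfl⟩
    exact ⟨x, (h x).mp hx, rfl⟩
  · rintro ⟨x, hx, rfl⟩
    exact ⟨x, (h x).mpr hx, rfl⟩

-- ===== VERDICT (by name: the statement is the Claim_ definition above) =====
theorem find_unique_tsuro_cards_spec : Claim_equal_find_unique_tsuro_cards := by
  intro n hDom
  unfold Spec_find_unique_tsuro_cards
  by_cases hn : n < 1
  · have hA : find_all_tsuro_cards n = [] := by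
      unfold find_all_tsuro_cards
      rw [if_pos hn]
    simp only [find_unique_tsuro_cards, find_unique_tsuro_cards_alt, hA, if_pos hn]
    simp
  · have hn1 : 1 ≤ n := by omega
    have hAlt : find_unique_tsuro_cards_alt n =
        pvPipeline (pvPlaceB n (2 * n) (n.toNat + 1) (List.replicate (2 * n).toNat false) [] 1) (2 * n) := by
      unfold find_unique_tsuro_cards_alt
      rw [if_neg hn]
    by_cases hA : find_all_tsuro_cards n = []
    · have hBempty : pvPlaceB n (2 * n) (n.toNat + 1) (List.replicate (2 * n).toNat false) [] 1 = [] := by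
        rw [List.eq_nil_iff_forall_not_mem]
        intro x hx
        have hg := (solsB_char n hn1 x).mp hx
        have h2 := (cleanA_mem n hn x).mpr hg
        rw [hA] at h2
        simp at h2
      rw [hAlt, hBempty]
      simp only [find_unique_tsuro_cards, hA]
      simp [pvPipeline, PySem.List.sorted_eq_nil_iff]
    · rw [hAlt]
      simp only [find_unique_tsuro_cards]
      rw [if_neg hA]
      exact pipeline_congr _ _ (2 * n) (fun x => (cleanA_mem n hn x).trans ((solsB_char n hn1 x)).symm)
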